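-- pv_equiv track=rewrite | github.com/SuperbHardik12/equations-solver | main.py | brackets_check
-- ===== SOURCE A (Python) =====
-- def brackets_check(a):
--     a = '+' + a + '+'
--     b = ""
--     i = 0
--     while i < len(a):
--         if a[i] == '-' and a[i + 1] == '(':
--             b = b + '-'
--             j = i
--             while a[j] != ')':
--                 j = j + 1
--             temp = j
--             for k in range(i + 1, temp + 1):
--                 if a[k] == '+':
--                     b += '-'
--                 elif a[k] == '-':
--                     b += '+'
--                 else:
--                     b += a[k]
--             i = temp
--         else:
--             b += a[i]
--         i = i + 1
--     a = b
--     a = a.replace('(', '')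
--     a = a.replace(')', '')
--     return a
-- ===== SOURCE B (Python) =====
-- def brackets_check(a):
--     s = '+' + a + '+'
--     out = []
--     flip = False
--     for i, c in enumerate(s):
--         if not flip:
--             if c == '-' and s[i + 1] == '(':
--                 flip = True
--             out.append(c)
--         elif c == '+':
--             out.append('-')
--         elif c == '-':
--             out.append('+')
--         else:
--             out.append(c)
--             if c == ')':
--                 flip = False
--     return ''.join(out).replace('(', '').replace(')', '')
-- ===== Notes on version B (the rewrite author's own statement) =====
-- stated objective: faster
-- what changed: A rewrites '-(...)' groups by jumping indices (inner while to locate the ')' plus a nested for re-copying the segment) with quadratic 'b = b + ...' string building; B is a single left-to-right pass with a boolean flip flag, appending to a list and joining once.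
import Mathlib
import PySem

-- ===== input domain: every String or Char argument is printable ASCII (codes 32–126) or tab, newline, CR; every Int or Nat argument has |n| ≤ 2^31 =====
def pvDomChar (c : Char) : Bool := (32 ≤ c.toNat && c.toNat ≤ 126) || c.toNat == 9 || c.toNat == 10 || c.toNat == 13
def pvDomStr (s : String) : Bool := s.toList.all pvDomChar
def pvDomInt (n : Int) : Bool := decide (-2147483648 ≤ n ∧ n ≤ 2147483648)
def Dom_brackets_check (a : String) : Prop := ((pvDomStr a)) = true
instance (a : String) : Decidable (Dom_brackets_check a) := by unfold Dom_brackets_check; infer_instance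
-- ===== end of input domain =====

-- B replaces A's index-jumping rewrite (inner while to find ')', nested for to copy the flipped
-- segment) by a single left-to-right pass with a boolean flip flag: simpler, one loop, no index jumps.

-- ===== PORT A =====
-- inner `while a[j] != ')': j += 1`; none = the IndexError Python raises when no ')' follows
def pvFindJ (cs : List Char) (j : Nat) : Option Nat :=
  match h : cs[j]? with
  | none => none
  | some c => if c = ')' then some j else pvFindJ cs (j + 1)
termination_by cs.length - j
decreasing_by
  have hj : j < cs.length := by
    rcases List.getElem?_eq_some_iff.mp h with ⟨h1, _⟩; exact h1
  omega

theorem pvFindJ_le (cs : List Char) (j t : Nat) (h : pvFindJ cs j = some t) : j ≤ t := by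
  induction j using pvFindJ.induct cs with
  | case1 j h' => rw [pvFindJ, h'] at h; exact absurd h (by simp)
  | case2 j h' => rw [pvFindJ, h'] at h; simp at h; omega
  | case3 j c h' hc ih =>
    rw [pvFindJ, h'] at h
    simp only [if_neg hc] at h
    have := ih h
    omega

-- outer while loop of A; b is the output accumulator; none = IndexError (excluded by Pre_)
def pvLoopA (cs : List Char) (i : Nat) (b : List Char) : Option (List Char) :=
  if hi : i < cs.length then
    if cs[i] = '-' then
      if hi2 : i + 1 < cs.length then
        if cs[i + 1] = '(' then
          match hT : pvFindJ cs i with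
          | none => none        -- the inner while runs off the end: IndexError
          | some temp =>
            -- `b += '-'` then `for k in range(i+1, temp+1)` appending the sign-flipped a[k]
            pvLoopA cs (temp + 1)
              ((PySem.List.pyRange ((i : Int) + 1) ((temp : Int) + 1) 1).foldl
                (fun acc k =>
                  let c := PySem.List.pyGetD cs k ' '
                  if c = '+' then acc ++ ['-']
                  else if c = '-' then acc ++ ['+']
                  else acc ++ [c]) (b ++ ['-']))
        else pvLoopA cs (i + 1) (b ++ [cs[i]])
      else none                 -- a[i+1] raises IndexError
    else pvLoopA cs (i + 1) (b ++ [cs[i]])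
  else some b
termination_by cs.length - i
decreasing_by
  · have := pvFindJ_le cs i temp hT; omega
  · omega
  · omega

-- a = '+' + a + '+'; loop; then a.replace('(','').replace(')','')
def brackets_check (a : String) : String :=
  let cs : List Char := '+' :: a.toList ++ ['+']
  match pvLoopA cs 0 [] with
  | none => ""                  -- Python raises IndexError here; excluded by Pre_
  | some b => String.ofList (PySem.Chars.replace (PySem.Chars.replace b ['('] []) [')'] [])

-- ===== PORT B =====
-- single pass with a flip flag (Source B); looking at the next char = head of the rest
def pvLoopB : List Char → Bool → List Char
  | [], _ => []
  | c :: rest, false => c :: pvLoopB rest (c = '-' && rest.head? == some '(')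
  | c :: rest, true =>
    if c = '+' then '-' :: pvLoopB rest true
    else if c = '-' then '+' :: pvLoopB rest true
    else c :: pvLoopB rest (!(c = ')'))

def brackets_check_alt (a : String) : String :=
  let s : List Char := '+' :: a.toList ++ ['+']
  String.ofList (PySem.Chars.replace (PySem.Chars.replace (pvLoopB s false) ['('] []) [')'] [])

-- ===== PRECONDITION & SPEC =====
-- Pre_ excludes exactly the inputs where A raises IndexError: a '-(' (in '+'+a+'+') with no ')' anywhere after it.
def Pre_brackets_check (a : String) : Prop :=
  ∀ t ∈ ('+' :: a.toList ++ ['+']).tails, ['-', '('] <+: t → ')' ∈ t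
instance (a : String) : Decidable (Pre_brackets_check a) := by unfold Pre_brackets_check; infer_instance

def pvWitness_brackets_check : String := "1-(2-3)"

def Spec_brackets_check (a : String) (out : String) : Prop := out = brackets_check_alt a
instance (a : String) (out : String) : Decidable (Spec_brackets_check a out) := by unfold Spec_brackets_check; infer_instance

-- ===== CLAIM (what is proved, stated in full; the proofs are below) =====
def Claim_equal_brackets_check : Prop := ∀ (a : String), Dom_brackets_check a → Pre_brackets_check a → Spec_brackets_check a (brackets_check a)

-- ===== LEMMAS AND PROOFS =====

def flipChar (c : Char) : Char := if c = '+' then '-' else if c = '-' then '+' else c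

-- index of the first ')' in a list, if any
def firstClose : List Char → Option Nat
  | [] => none
  | c :: r => if c = ')' then some 0 else (firstClose r).map (· + 1)

theorem firstClose_isSome {l : List Char} (h : ')' ∈ l) : (firstClose l).isSome := by
  induction l with
  | nil => simp at h
  | cons c r ih =>
    by_cases hc : c = ')'
    · simp [firstClose, hc]
    · rcases List.mem_cons.mp h with h1 | h2
      · exact absurd h1.symm hc
      · have := ih h2
        cases hr : firstClose r with
        | none => rw [hr] at this; simp at this
        | some m => simp [firstClose, hc, hr]

theorem firstClose_lt {l : List Char} {m : Nat} (h : firstClose l = some m) : m < l.length := by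
  induction l generalizing m with
  | nil => simp [firstClose] at h
  | cons c r ih =>
    by_cases hc : c = ')'
    · rw [firstClose, if_pos hc] at h
      injection h with h'
      subst h'
      simp
    · rw [firstClose, if_neg hc] at h
      cases hr : firstClose r with
      | none => rw [hr] at h; simp at h
      | some m' => rw [hr] at h; simp at h; have := ih hr; simp; omega

theorem pvFindJ_eq (cs : List Char) (j : Nat) :
    pvFindJ cs j = (firstClose (cs.drop j)).map (j + ·) := by
  induction j using pvFindJ.induct cs with
  | case1 j h' =>
    have hlen : cs.length ≤ j := List.getElem?_eq_none_iff.mp h'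
    rw [pvFindJ, h', List.drop_eq_nil_of_le hlen]
    rfl
  | case2 j h' =>
    have hj : j < cs.length := (List.getElem?_eq_some_iff.mp h').1
    have hdrop : cs.drop j = cs[j] :: cs.drop (j + 1) := (List.getElem_cons_drop hj).symm
    have hcj : cs[j] = ')' := (List.getElem?_eq_some_iff.mp h').2
    rw [pvFindJ, h', hdrop, firstClose, if_pos hcj]
    rfl
  | case3 j c h' hc ih =>
    have hj : j < cs.length := (List.getElem?_eq_some_iff.mp h').1
    have hdrop : cs.drop j = cs[j] :: cs.drop (j + 1) := (List.getElem_cons_drop hj).symm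
    have hcj : cs[j] = c := (List.getElem?_eq_some_iff.mp h').2
    rw [pvFindJ, h']
    simp only [if_neg hc, ih, hdrop, hcj, firstClose]
    cases firstClose (cs.drop (j + 1)) with
    | none => rfl
    | some m => simp; omega

-- the flagged stretch of B's pass: flip every sign up to and including the first ')'
theorem pvLoopB_true_eq {l : List Char} {m : Nat} (h : firstClose l = some m) :
    pvLoopB l true = (l.take (m + 1)).map flipChar ++ pvLoopB (l.drop (m + 1)) false := by
  induction l generalizing m with
  | nil => simp [firstClose] at h
  | cons c r ih =>
    by_cases hc : c = ')'
    · rw [firstClose, if_pos hc] at h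
      simp only [Option.some.injEq] at h
      subst hc; subst h
      simp [pvLoopB, flipChar]
    · rw [firstClose, if_neg hc] at h
      cases hr : firstClose r with
      | none => rw [hr] at h; simp at h
      | some m' =>
        rw [hr] at h
        simp only [Option.map_some, Option.some.injEq] at h
        subst h
        by_cases hp : c = '+'
        · simp [pvLoopB, hp, ih hr, flipChar]
        · by_cases hm : c = '-'
          · simp [pvLoopB, hm, ih hr, flipChar]
          · simp [pvLoopB, hp, hm, hc, ih hr, flipChar]

-- A's for-k copy loop equals map flipChar over the corresponding segment
theorem segFold_eq (cs : List Char) (a n : Nat) (h : a + n ≤ cs.length) (init : List Char) :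
    (PySem.List.pyRange (a : Int) ((a : Int) + n) 1).foldl
      (fun acc k =>
        let c := PySem.List.pyGetD cs k ' '
        if c = '+' then acc ++ ['-']
        else if c = '-' then acc ++ ['+']
        else acc ++ [c]) init
    = init ++ ((cs.drop a).take n).map flipChar := by
  induction n generalizing init with
  | zero => rw [PySem.List.pyRange_one_eq_nil (by omega)]; simp
  | succ n ih =>
    have hstep : ((a : Int) + (n + 1 : Nat)) = ((a : Int) + n) + 1 := by push_cast; ring
    rw [hstep, PySem.List.pyRange_one_succ_right (by omega), List.foldl_append,
        ih (by omega)]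
    have hlt : a + n < cs.length := by omega
    have hget : PySem.List.pyGetD cs ((a : Int) + n) ' ' = cs[a + n] := by
      have : ((a : Int) + n) = ((a + n : Nat) : Int) := by push_cast; ring
      rw [this, PySem.List.pyGetD_natCast]
      simp [List.getD_eq_getElem?_getD, List.getElem?_eq_getElem hlt]
    have hn : n < (cs.drop a).length := by simp; omega
    have htake : (cs.drop a).take (n + 1) = (cs.drop a).take n ++ [cs[a + n]] := by
      rw [List.take_add_one]
      simp [List.getElem?_eq_getElem hn, List.getElem_drop]
    simp only [List.foldl_cons, List.foldl_nil]
    rw [htake, List.map_append]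
    simp only [hget]
    by_cases hp : cs[a + n] = '+'
    · simp [hp, flipChar]
    · by_cases hm2 : cs[a + n] = '-'
      · simp [hp, hm2, flipChar]
      · simp [hp, hm2, flipChar]

-- main invariant: from position i on, A's index loop and B's flag pass emit the same characters
theorem loop_eq (n : Nat) : ∀ (cs : List Char) (i : Nat) (b : List Char),
    cs.length - i ≤ n →
    cs.getLast? = some '+' →
    (∀ t, t <:+ cs.drop i → ['-', '('] <+: t → ')' ∈ t) →
    pvLoopA cs i b = some (b ++ pvLoopB (cs.drop i) false) := by
  induction n with
  | zero =>
    intro cs i b hn _ _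
    have hi : ¬ i < cs.length := by omega
    rw [pvLoopA, dif_neg hi, List.drop_eq_nil_of_le (by omega)]
    simp [pvLoopB]
  | succ n ih =>
    intro cs i b hn hlast hpre
    by_cases hi : i < cs.length
    · have hdrop : cs.drop i = cs[i] :: cs.drop (i + 1) := (List.getElem_cons_drop hi).symm
      have hsub1 : cs.drop (i + 1) <:+ cs.drop i := ⟨[cs[i]], by rw [hdrop]; rfl⟩
      have hsuf1 : ∀ t, t <:+ cs.drop (i + 1) → ['-', '('] <+: t → ')' ∈ t := by
        intro t ht
        exact hpre t (ht.trans hsub1)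
      by_cases hc : cs[i] = '-'
      · -- a[i] == '-' : look at a[i+1]
        have hi1 : i + 1 < cs.length := by
          by_contra hge
          have h1 : cs[cs.length - 1]? = some '+' := by
            rw [← List.getLast?_eq_getElem?]; exact hlast
          have h2 : cs[cs.length - 1]? = cs[i]? := by
            congr 1; omega
          rw [h2, List.getElem?_eq_getElem hi] at h1
          simp only [Option.some.injEq] at h1
          rw [h1] at hc
          exact absurd hc (by decide)
        have hdrop1 : cs.drop (i + 1) = cs[i+1] :: cs.drop (i + 2) :=
          (List.getElem_cons_drop hi1).symm
        by_cases hc2 : cs[i+1] = '('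
        · -- the '-(' case: A jumps to the ')' and copies flipped; B raises its flag
          have hmem : (')' : Char) ∈ cs.drop i := by
            apply hpre (cs.drop i) (List.suffix_refl _)
            rw [hdrop, hdrop1, hc, hc2]
            exact ⟨cs.drop (i + 2), rfl⟩
          obtain ⟨m0, hm0⟩ := Option.isSome_iff_exists.mp (firstClose_isSome hmem)
          have hfc : firstClose (cs.drop i) = (firstClose (cs.drop (i+1))).map (· + 1) := by
            rw [hdrop, firstClose, if_neg (by rw [hc]; decide)]
          obtain ⟨m', hm'⟩ : ∃ m', firstClose (cs.drop (i + 1)) = some m' := by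
            rcases hfc' : firstClose (cs.drop (i + 1)) with _ | m'
            · rw [hfc, hfc'] at hm0; simp at hm0
            · exact ⟨m', rfl⟩
          have hm0' : m0 = m' + 1 := by
            rw [hfc, hm'] at hm0; simp at hm0; omega
          have hfind : pvFindJ cs i = some (i + m0) := by
            rw [pvFindJ_eq, hm0]; rfl
          have hm0lt : i + m0 < cs.length := by
            have := firstClose_lt hm0
            simp at this; omega
          rw [pvLoopA, dif_pos hi, if_pos hc, dif_pos hi1, if_pos hc2, hfind]
          split
          next heq => simp at heq
          next temp heq =>
          injection heq with heq'
          subst heq'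
          rw [show ((i : Int) + 1) = ((i + 1 : Nat) : Int) by push_cast; ring,
              show ((i + m0 : Nat) : Int) + 1 = ((i + 1 : Nat) : Int) + (m0 : Nat) by push_cast; ring]
          rw [segFold_eq cs (i + 1) m0 (by omega)]
          have hsub2 : cs.drop (i + m0 + 1) <:+ cs.drop i := by
            have h := List.drop_suffix (m0 + 1) (cs.drop i)
            rwa [List.drop_drop, show i + (m0 + 1) = i + m0 + 1 from by ring] at h
          rw [ih cs (i + m0 + 1) _ (by omega) hlast
              (fun t ht hp => hpre t (ht.trans hsub2) hp)]
          have hflag : pvLoopB (cs.drop i) false = cs[i] :: pvLoopB (cs.drop (i + 1)) true := by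
            rw [hdrop, pvLoopB]
            congr 1
            rw [List.head?_drop, List.getElem?_eq_getElem hi1]
            simp [hc, hc2]
          rw [hflag, hc, pvLoopB_true_eq hm', List.drop_drop, hm0',
              show i + 1 + (m' + 1) = i + (m' + 1) + 1 from by omega]
          simp [List.append_assoc]
        · -- '-' not followed by '(' : plain copy on both sides
          rw [pvLoopA, dif_pos hi, if_pos hc, dif_pos hi1, if_neg hc2,
              ih cs (i + 1) _ (by omega) hlast hsuf1, hdrop, pvLoopB]
          have hb : (decide (cs[i] = '-') && (cs.drop (i + 1)).head? == some '(') = false := by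
            rw [List.head?_drop, List.getElem?_eq_getElem hi1]
            simp [hc2]
          rw [hb]
          simp
      · -- a[i] ≠ '-' : plain copy on both sides
        rw [pvLoopA, dif_pos hi, if_neg hc,
            ih cs (i + 1) _ (by omega) hlast hsuf1, hdrop, pvLoopB]
        have hb : (decide (cs[i] = '-') && (cs.drop (i + 1)).head? == some '(') = false := by
          simp [hc]
        rw [hb]
        simp
    · rw [pvLoopA, dif_neg hi, List.drop_eq_nil_of_le (by omega)]
      simp [pvLoopB]

-- ===== VERDICT (by name: the statement is the Claim_ definition above) =====
theorem brackets_check_spec : Claim_equal_brackets_check := by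
  intro a _ hpre
  unfold Spec_brackets_check
  have hlast : ('+' :: a.toList ++ ['+']).getLast? = some '+' := by
    rw [show ('+' :: a.toList ++ ['+']) = ('+' :: a.toList) ++ ['+'] by simp]
    exact List.getLast?_concat
  have hmain := loop_eq ('+' :: a.toList ++ ['+']).length ('+' :: a.toList ++ ['+']) 0 []
    (by omega) hlast
    (by intro t ht hp
        exact hpre t ((List.mem_tails _ _).mpr (by simpa using ht)) hp)
  simp only [List.drop_zero, List.nil_append] at hmain
  simp only [brackets_check, brackets_check_alt, hmain]
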